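-- pv_equiv track=rewrite | github.com/HaesungSeo/cook-books | DPDK/corelist-build.py | hex_mask_to_cpu_list
-- ===== SOURCE A (Python) =====
-- def hex_mask_to_cpu_list(hex_mask_str: str) -> str:
--     """
--     예: "ffffffff,fffffff0,001fffff" -> "1-8,10-11,100-112" (예시 형식)
--
--     콤마로 구분된 32비트 단위 16진수 문자열을 읽어 bitmask로 복원한 뒤,
--     set된 비트들의 인덱스를 연속 구간으로 묶어서 "시작-끝" 형태 목록으로 반환한다.
--     """
--     if not hex_mask_str.strip():
--         return ""
--
--     chunks = hex_mask_str.split(',')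
--     bitmask = 0
--     for i, chunk in enumerate(chunks):
--         chunk = chunk.strip()
--         val = int(chunk, 16)
--         bitmask |= (val << (32 * i))
--
--     # set된 비트(코어 인덱스) 찾기
--     set_bits = []
--     pos = 0
--     temp_mask = bitmask
--     while temp_mask > 0:
--         if temp_mask & 1:
--             set_bits.append(pos)
--         temp_mask >>= 1
--         pos += 1
--
--     if not set_bits:
--         # 모두 0이면 아무 코어도 없다는 의미
--         return ""
--
--     # 연속 구간으로 묶기
--     ranges = []
--     start = set_bits[0]
--     prev = set_bits[0]
--     for b in set_bits[1:]:
--         if b == prev + 1: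
--             prev = b
--         else:
--             if start == prev:
--                 ranges.append(str(start))
--             else:
--                 ranges.append(f"{start}-{prev}")
--             start = b
--             prev = b
--     # 마지막 구간 처리
--     if start == prev:
--         ranges.append(str(start))
--     else:
--         ranges.append(f"{start}-{prev}")
--
--     return ",".join(ranges)
-- ===== SOURCE B (Python) =====
-- def hex_mask_to_cpu_list(hex_mask_str: str) -> str:
--     if not hex_mask_str.strip():
--         return ""
--     mask, shift = 0, 0
--     for chunk in hex_mask_str.split(','):
--         mask |= int(chunk.strip(), 16) << shift
--         shift += 32
--     if mask <= 0:
--         return ""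
--     bits = bin(mask)[:1:-1]  # LSB-first binary digit string
--     n = len(bits)
--     # a core c starts a range iff bit c is set and bit c-1 is not; ends one iff bit c+1 is not
--     starts = [c for c in range(n) if bits[c] == '1' and (c == 0 or bits[c - 1] == '0')]
--     ends = [c for c in range(n) if bits[c] == '1' and (c == n - 1 or bits[c + 1] == '0')]
--     return ",".join(str(s) if s == e else f"{s}-{e}" for s, e in zip(starts, ends))
-- ===== Notes on version B (the rewrite author's own statement) =====
-- stated objective: faster
-- what changed: B builds the mask with a running shift accumulator instead of enumerate, then replaces A's per-bit bigint shift loop plus stateful run-merging pass by one bin() conversion to a digit string and a boundary characterization: a core starts a range iff its bit is set and the bit below is clear, and ends one iff the bit above is clear; the result is the join of the zipped start/end filters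
import Mathlib
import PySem

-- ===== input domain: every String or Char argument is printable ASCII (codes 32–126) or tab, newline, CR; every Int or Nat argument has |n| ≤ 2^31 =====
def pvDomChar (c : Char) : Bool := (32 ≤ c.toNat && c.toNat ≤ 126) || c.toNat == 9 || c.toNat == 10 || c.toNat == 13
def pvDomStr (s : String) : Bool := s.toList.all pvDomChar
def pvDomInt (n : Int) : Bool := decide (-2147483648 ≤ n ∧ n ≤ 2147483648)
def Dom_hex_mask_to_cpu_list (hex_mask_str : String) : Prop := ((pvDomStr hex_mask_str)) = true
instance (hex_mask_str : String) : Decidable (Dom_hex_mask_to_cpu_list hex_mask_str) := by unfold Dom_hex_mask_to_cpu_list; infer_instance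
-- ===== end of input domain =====

-- B builds the mask with a running shift accumulator instead of enumerate, converts it once to a
-- binary digit string and reads the ranges off by a boundary characterization (a core starts/ends a
-- range iff the digit below/above is '0', two filters and a zip), avoiding A's per-bit bigint shifts.

-- Python's  v << k  (k ≥ 0) is Lean's  v <<< k  on Int with a Nat shift amount
def pvShl (v : Int) (n : Nat) : Int := v <<< n

-- str(start) / f"{start}-{prev}" — both Pythons format a run with these very expressions
def pvFmt (s p : Nat) : String :=
  if s = p then PySem.Int.toStr (s : Int)
  else PySem.Int.toStr (s : Int) ++ "-" ++ PySem.Int.toStr (p : Int)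

-- ===== PORT A =====

-- for i, chunk in enumerate(chunks): bitmask |= int(chunk.strip(), 16) << (32 * i)
-- (none exactly when some int() raises ValueError; i ≥ 0 from enumerate, so .toNat on the shift is exact)
def pvMaskOfEnum? (chunks : List String) : Option Int :=
  (PySem.List.enumerate chunks).foldl
    (fun acc p =>
      acc.bind fun m =>
        (PySem.Int.ofStrBase? (PySem.Str.strip p.2) 16).map fun v : Int =>
          PySem.Int.bor m (pvShl v (32 * p.1).toNat))
    (some 0)

-- while temp_mask > 0: if temp_mask & 1: set_bits.append(pos); temp_mask >>= 1; pos += 1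
-- (temp_mask & 1 = temp_mask % 2 and temp_mask >> 1 = temp_mask / 2: exact, Lean's Int % / are
--  Euclidean and the loop only runs for temp_mask > 0; pos, a nonnegative counter, is kept as Nat)
def pvBitsLoop (m : Int) (pos : Nat) : List Nat :=
  if 0 < m then
    (if m % 2 = 1 then [pos] else []) ++ pvBitsLoop (m / 2) (pos + 1)
  else []
termination_by m.toNat
decreasing_by omega

-- for b in set_bits[1:]: … — state (ranges, start, prev)
def pvMergeLoop : List Nat → List String → Nat → Nat → List String × Nat × Nat
  | [], ranges, start, prev => (ranges, start, prev)
  | b :: bs, ranges, start, prev =>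
    if b = prev + 1 then pvMergeLoop bs ranges start b
    else pvMergeLoop bs (ranges ++ [pvFmt start prev]) b b

def hex_mask_to_cpu_list (hex_mask_str : String) : String :=
  if PySem.Str.strip hex_mask_str = "" then ""
  else
    match pvMaskOfEnum? ((PySem.Chars.splitOn hex_mask_str.toList [',']).map String.ofList) with
    | none => ""   -- int() raises ValueError here; excluded by Pre_
    | some bitmask =>
      let set_bits := pvBitsLoop bitmask 0
      match set_bits with
      | [] => ""
      | b0 :: rest =>
        let r := pvMergeLoop rest [] b0 b0
        PySem.Str.join "," (r.1 ++ [pvFmt r.2.1 r.2.2])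

-- ===== PORT B =====

-- bin(m) for m > 0, least-significant digit first
def pvBinLSB (m : Nat) : List Char :=
  if m = 0 then []
  else (if m % 2 = 1 then '1' else '0') :: pvBinLSB (m / 2)
decreasing_by exact Nat.div_lt_self (Nat.pos_of_ne_zero (by omega)) one_lt_two

-- for chunk in chunks: mask |= int(chunk.strip(), 16) << shift; shift += 32 — state (mask, shift)
def pvMaskShift? (chunks : List String) : Option (Int × Nat) :=
  chunks.foldl
    (fun acc chunk =>
      acc.bind fun ms : Int × Nat =>
        (PySem.Int.ofStrBase? (PySem.Str.strip chunk) 16).map fun v : Int =>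
          (PySem.Int.bor ms.1 (pvShl v ms.2), ms.2 + 32))
    (some (0, 0))

def hex_mask_to_cpu_list_alt (hex_mask_str : String) : String :=
  if PySem.Str.strip hex_mask_str = "" then ""
  else
    match pvMaskShift? ((PySem.Chars.splitOn hex_mask_str.toList [',']).map String.ofList) with
    | none => ""   -- int() raises ValueError here; excluded by Pre_
    | some ms =>
      if ms.1 ≤ 0 then ""
      else
        -- mask > 0: mask.toNat is exact; bin(mask)[:1:-1] (the LSB-first binary digit string) is
        -- ported as the recursive base-2 digit list; range(n) with n ≥ 0 = List.range; the
        -- bits[c] lookups are always in range, so List.getD's default is never consulted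
        let bits := pvBinLSB ms.1.toNat
        let n := bits.length
        let starts := (List.range n).filter fun c =>
          bits.getD c '0' == '1' && (c == 0 || bits.getD (c - 1) '0' == '0')
        let ends := (List.range n).filter fun c =>
          bits.getD c '0' == '1' && (c == n - 1 || bits.getD (c + 1) '0' == '0')
        PySem.Str.join "," ((starts.zip ends).map fun p => pvFmt p.1 p.2)

-- ===== PRECONDITION & SPEC =====

-- Pre_ excludes exactly the inputs where A raises ValueError: some comma-separated chunk is not a
-- valid base-16 integer literal (and the string is not all-whitespace, where A returns "" early).
def Pre_hex_mask_to_cpu_list (hex_mask_str : String) : Prop :=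
  PySem.Str.strip hex_mask_str = "" ∨
    ∀ c ∈ (PySem.Chars.splitOn hex_mask_str.toList [',']).map String.ofList,
      (PySem.Int.ofStrBase? (PySem.Str.strip c) 16).isSome = true
instance (hex_mask_str : String) : Decidable (Pre_hex_mask_to_cpu_list hex_mask_str) := by
  unfold Pre_hex_mask_to_cpu_list; infer_instance

def pvWitness_hex_mask_to_cpu_list : String := "ffffffff,fffffff0,001fffff"

def Spec_hex_mask_to_cpu_list (hex_mask_str : String) (out : String) : Prop := out = hex_mask_to_cpu_list_alt hex_mask_str
instance (hex_mask_str : String) (out : String) : Decidable (Spec_hex_mask_to_cpu_list hex_mask_str out) := by unfold Spec_hex_mask_to_cpu_list; infer_instance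

-- ===== CLAIM (what is proved, stated in full; the proofs are below) =====
def Claim_equal_hex_mask_to_cpu_list : Prop := ∀ (hex_mask_str : String), Dom_hex_mask_to_cpu_list hex_mask_str → Pre_hex_mask_to_cpu_list hex_mask_str → Spec_hex_mask_to_cpu_list hex_mask_str (hex_mask_to_cpu_list hex_mask_str)

-- ===== LEMMAS AND PROOFS =====

theorem pvSize_rec (n : Nat) (h : n ≠ 0) : n.size = (n / 2).size + 1 := by
  have hb : Nat.bit (decide (n % 2 = 1)) (n / 2) = n := by
    by_cases h2 : n % 2 = 1 <;> simp [h2, Nat.bit_val] <;> omega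
  conv_lhs => rw [← hb]
  exact Nat.size_bit (by rw [hb]; exact h)

theorem pvBinLSB_getD (m c : Nat) :
    (pvBinLSB m).getD c '0' = (if m.testBit c then '1' else '0') := by
  induction m using Nat.strong_induction_on generalizing c with
  | _ m ih =>
    by_cases h : m = 0
    · subst h
      rw [pvBinLSB]
      simp
    · rw [pvBinLSB, if_neg h]
      cases c with
      | zero =>
        rw [List.getD_cons_zero]
        rw [Nat.testBit_zero]
        by_cases h2 : m % 2 = 1
        · simp [h2]
        · simp [h2]
      | succ c =>
        rw [List.getD_cons_succ, Nat.testBit_add_one]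
        exact ih (m / 2) (Nat.div_lt_self (Nat.pos_of_ne_zero h) one_lt_two) c

theorem pvBinLSB_length (m : Nat) : (pvBinLSB m).length = m.size := by
  induction m using Nat.strong_induction_on with
  | _ m ih =>
    by_cases h : m = 0
    · subst h
      rw [pvBinLSB]
      simp
    · rw [pvBinLSB, if_neg h, pvSize_rec m h]
      simp [ih (m / 2) (Nat.div_lt_self (Nat.pos_of_ne_zero h) one_lt_two)]

-- B's digit-string tests are the testBit boundary tests
theorem pvAltBits (m : Nat) :
    (let bits := pvBinLSB m
     let n := bits.length
     let starts := (List.range n).filter fun c =>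
       bits.getD c '0' == '1' && (c == 0 || bits.getD (c - 1) '0' == '0')
     let ends := (List.range n).filter fun c =>
       bits.getD c '0' == '1' && (c == n - 1 || bits.getD (c + 1) '0' == '0')
     PySem.Str.join "," ((starts.zip ends).map fun p => pvFmt p.1 p.2))
    = (let n := m.size
       let starts := (List.range n).filter fun c => m.testBit c && (c == 0 || !m.testBit (c - 1))
       let ends := (List.range n).filter fun c => m.testBit c && !m.testBit (c + 1)
       PySem.Str.join "," ((starts.zip ends).map fun p => pvFmt p.1 p.2)) := by
  have hbit : ∀ c, ((pvBinLSB m).getD c '0' == '1') = m.testBit c := by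
    intro c
    rw [pvBinLSB_getD]
    by_cases hb : m.testBit c
    · simp [hb]
    · simp [hb]
  have hbit0 : ∀ c, ((pvBinLSB m).getD c '0' == '0') = !m.testBit c := by
    intro c
    rw [pvBinLSB_getD]
    by_cases hb : m.testBit c
    · simp [hb]
    · simp [hb]
  simp only [pvBinLSB_length]
  have hstarts : ∀ c ∈ List.range m.size,
      ((pvBinLSB m).getD c '0' == '1' && (c == 0 || (pvBinLSB m).getD (c - 1) '0' == '0'))
        = (m.testBit c && (c == 0 || !m.testBit (c - 1))) := by
    intro c _
    rw [hbit, hbit0]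
  have hends : ∀ c ∈ List.range m.size,
      ((pvBinLSB m).getD c '0' == '1' && (c == m.size - 1 || (pvBinLSB m).getD (c + 1) '0' == '0'))
        = (m.testBit c && !m.testBit (c + 1)) := by
    intro c hc
    rw [hbit, hbit0]
    rcases List.mem_range.mp hc with hlt
    by_cases htop : c = m.size - 1
    · have hge : m < 2 ^ (c + 1) := by
        have h1 : m < 2 ^ m.size := Nat.lt_size_self m
        have h2 : (2:Nat) ^ m.size ≤ 2 ^ (c + 1) := Nat.pow_le_pow_right (by omega) (by omega)
        omega
      have hb1 : m.testBit (c + 1) = false := Nat.testBit_lt_two_pow hge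
      have hb2 : (c == m.size - 1) = true := by simp [htop]
      rw [hb1, hb2]
      simp
    · have hb2 : (c == m.size - 1) = false := by simp; omega
      rw [hb2]
      simp
  rw [List.filter_congr hstarts, List.filter_congr hends]

-- the ascending list of set-bit positions of a natural number
def pvNatBits (n : Nat) : List Nat :=
  if h : n = 0 then []
  else (if n % 2 = 1 then [0] else []) ++ (pvNatBits (n / 2)).map (· + 1)
decreasing_by exact Nat.div_lt_self (Nat.pos_of_ne_zero h) one_lt_two

-- the run decomposition A's merge loop computes
def pvRuns (start prev : Nat) : List Nat → List (Nat × Nat)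
  | [] => [(start, prev)]
  | b :: bs => if b = prev + 1 then pvRuns start b bs else (start, prev) :: pvRuns b b bs

-- A's enumerate-and-shift fold and B's running-shift fold build the same mask
theorem pvMask_link (chunks : List String) (k : Nat) (a : Option Int) :
    chunks.foldl
      (fun acc chunk =>
        acc.bind fun ms : Int × Nat =>
          (PySem.Int.ofStrBase? (PySem.Str.strip chunk) 16).map fun v : Int =>
            (PySem.Int.bor ms.1 (pvShl v ms.2), ms.2 + 32))
      (a.map fun m => (m, (32 * k : Nat)))
    = ((PySem.List.enumerate chunks (k : Int)).foldl
        (fun acc p =>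
          acc.bind fun m =>
            (PySem.Int.ofStrBase? (PySem.Str.strip p.2) 16).map fun v : Int =>
              PySem.Int.bor m (pvShl v (32 * p.1).toNat))
        a).map fun m => (m, (32 * (k + chunks.length) : Nat)) := by
  induction chunks generalizing k a with
  | nil => simp
  | cons c cs ih =>
    rw [PySem.List.enumerate_cons, List.foldl_cons, List.foldl_cons]
    have hshift : ((32 : Int) * (k : Int)).toNat = 32 * k := by
      omega
    have hstep :
        ((a.map fun m => (m, 32 * k)).bind fun ms =>
          (PySem.Int.ofStrBase? (PySem.Str.strip c) 16).map fun v : Int =>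
            (PySem.Int.bor ms.1 (pvShl v ms.2), ms.2 + 32))
        = ((a.bind fun m =>
            (PySem.Int.ofStrBase? (PySem.Str.strip c) 16).map fun v : Int =>
              PySem.Int.bor m (pvShl v (32 * (k : Int)).toNat)).map
                fun m => (m, 32 * (k + 1))) := by
      cases a with
      | none => rfl
      | some m =>
        cases hp : PySem.Int.ofStrBase? (PySem.Str.strip c) 16 with
        | none => rfl
        | some v =>
          simp only [Option.map_some, Option.bind_some, hshift]
          ring_nf
    rw [hstep]
    have hk1 : ((k : Int) + 1) = ((k + 1 : Nat) : Int) := by push_cast; ring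
    rw [hk1, ih (k + 1)]
    congr 1
    funext m
    congr 1
    simp [List.length_cons]
    ring

theorem pvMaskShift?_eq (chunks : List String) :
    pvMaskShift? chunks
      = (pvMaskOfEnum? chunks).map fun m => (m, (32 * chunks.length : Nat)) := by
  have h := pvMask_link chunks 0 (some 0)
  simp only [Nat.cast_zero, Nat.mul_zero, Nat.zero_add, Option.map_some] at h
  unfold pvMaskShift? pvMaskOfEnum?
  exact h

theorem pvFoldSome (l : List (Int × String)) (acc : Option Int)
    (hacc : acc.isSome = true)
    (h : ∀ p ∈ l, (PySem.Int.ofStrBase? (PySem.Str.strip p.2) 16).isSome = true) :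
    (l.foldl
      (fun acc p =>
        acc.bind fun m =>
          (PySem.Int.ofStrBase? (PySem.Str.strip p.2) 16).map fun v : Int =>
            PySem.Int.bor m (pvShl v (32 * p.1).toNat))
      acc).isSome = true := by
  induction l generalizing acc with
  | nil => simpa using hacc
  | cons q t ih =>
    simp only [List.foldl_cons]
    apply ih
    · obtain ⟨m, hm⟩ := Option.isSome_iff_exists.mp hacc
      obtain ⟨v, hv⟩ := Option.isSome_iff_exists.mp (h q (List.mem_cons_self ..))
      rw [hm, hv]
      rfl
    · intro p hp; exact h p (List.mem_cons_of_mem _ hp)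

theorem pvMaskOfEnum?_isSome (chunks : List String)
    (h : ∀ c ∈ chunks, (PySem.Int.ofStrBase? (PySem.Str.strip c) 16).isSome = true) :
    (pvMaskOfEnum? chunks).isSome = true := by
  unfold pvMaskOfEnum?
  refine pvFoldSome _ _ rfl ?_
  intro p hp
  apply h
  have := List.mem_map_of_mem (f := fun q : Int × String => q.2) hp
  rwa [PySem.List.map_snd_enumerate] at this

theorem pvBitsLoop_eq (m : Int) (pos : Nat) :
    pvBitsLoop m pos = (pvNatBits m.toNat).map (· + pos) := by
  induction hk : m.toNat using Nat.strong_induction_on generalizing m pos with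
  | _ k ih =>
    subst hk
    by_cases hm : 0 < m
    · rw [pvBitsLoop, if_pos hm, pvNatBits, dif_neg (by omega : m.toNat ≠ 0)]
      have hdiv : (m / 2).toNat = m.toNat / 2 := by omega
      rw [ih (m / 2).toNat (by omega) (m / 2) (pos + 1) rfl, hdiv]
      have hmod : (m % 2 = 1) ↔ (m.toNat % 2 = 1) := by omega
      have hcomp : ((fun x => x + pos) ∘ (fun x => x + 1)) = (fun x => x + (pos + 1)) := by
        funext x; simp; omega
      by_cases h2 : m % 2 = 1
      · rw [if_pos h2, if_pos (hmod.mp h2)]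
        simp [List.map_map, hcomp]
      · rw [if_neg h2, if_neg (fun hh => h2 (hmod.mpr hh))]
        simp [List.map_map, hcomp]
    · rw [pvBitsLoop, if_neg hm, pvNatBits]
      rw [dif_pos (by omega : m.toNat = 0)]
      simp

theorem pvNatBits_eq_filter (n : Nat) :
    pvNatBits n = (List.range n.size).filter n.testBit := by
  induction n using Nat.strong_induction_on with
  | _ n ih =>
    by_cases h : n = 0
    · subst h; simp [pvNatBits]
    · rw [pvNatBits, dif_neg h, pvSize_rec n h, List.range_succ_eq_map]
      rw [ih (n / 2) (Nat.div_lt_self (Nat.pos_of_ne_zero h) one_lt_two)]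
      rw [List.filter_cons, List.filter_map]
      have hpred : (n.testBit ∘ Nat.succ) = (n / 2).testBit := by
        funext i
        simp [Function.comp, Nat.testBit_add_one]
      rw [hpred]
      have ht0 : n.testBit 0 = decide (n % 2 = 1) := Nat.testBit_zero n
      by_cases h2 : n % 2 = 1
      · simp [ht0, h2]
      · simp [ht0, h2]

theorem pvNatBits_ne_nil {n : Nat} (h : n ≠ 0) : pvNatBits n ≠ [] := by
  induction n using Nat.strong_induction_on with
  | _ n ih =>
    rw [pvNatBits]
    rw [dif_neg h]
    rcases Nat.even_or_odd n with he | ho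
    · have h2 : n % 2 = 0 := Nat.even_iff.mp he
      have hd : n / 2 ≠ 0 := by omega
      have := ih (n / 2) (Nat.div_lt_self (Nat.pos_of_ne_zero h) one_lt_two) hd
      simp [h2, this]
    · have h2 : n % 2 = 1 := Nat.odd_iff.mp ho
      simp [h2]

theorem pvMergeLoop_flat (bs : List Nat) (ranges : List String) (s p : Nat) :
    (pvMergeLoop bs ranges s p).1 ++ [pvFmt (pvMergeLoop bs ranges s p).2.1 (pvMergeLoop bs ranges s p).2.2]
      = ranges ++ (pvRuns s p bs).map (fun q => pvFmt q.1 q.2) := by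
  induction bs generalizing ranges s p with
  | nil => simp [pvMergeLoop, pvRuns]
  | cons b bs ih =>
    simp only [pvMergeLoop, pvRuns]
    by_cases hb : b = p + 1
    · rw [if_pos hb, if_pos hb]
      exact ih ranges s b
    · rw [if_neg hb, if_neg hb]
      rw [ih (ranges ++ [pvFmt s p]) b b]
      simp

theorem pvRuns_snd (bs : List Nat) (s p : Nat) (h : (p :: bs).Pairwise (· < ·)) :
    (pvRuns s p bs).map (·.2) = (p :: bs).filter (fun c => !decide ((c + 1) ∈ (p :: bs))) := by
  induction bs generalizing s p with
  | nil => simp [pvRuns]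
  | cons b bs ih =>
    have hpb : p < b := (List.pairwise_cons.mp h).1 b (List.mem_cons_self ..)
    have h' : (b :: bs).Pairwise (· < ·) := (List.pairwise_cons.mp h).2
    have hbx : ∀ x ∈ bs, b < x := (List.pairwise_cons.mp h').1
    have hloc : ∀ c ∈ b :: bs,
        (!decide ((c + 1) ∈ (b :: bs))) = (!decide ((c + 1) ∈ (p :: b :: bs))) := by
      intro c hc
      have hcb : b ≤ c := by
        rcases List.mem_cons.mp hc with rfl | hx
        · exact le_refl _
        · exact le_of_lt (hbx _ hx)
      have hiff : ((c + 1) ∈ (b :: bs)) ↔ ((c + 1) ∈ (p :: b :: bs)) := by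
        constructor
        · intro hm; exact List.mem_cons_of_mem _ hm
        · intro hm
          rcases List.mem_cons.mp hm with he | hm
          · omega
          · exact hm
      exact congrArg (fun b => !b) (decide_eq_decide.mpr hiff)
    simp only [pvRuns]
    by_cases hb : b = p + 1
    · rw [if_pos hb, ih s b h']
      have hin : (p + 1) ∈ (p :: b :: bs) := by
        rw [← hb]; exact List.mem_cons_of_mem _ (List.mem_cons_self ..)
      have hcond : (!decide ((p + 1) ∈ (p :: b :: bs))) = false := by simp [hin]
      conv_rhs => rw [List.filter_cons]
      rw [hcond]
      simp only [Bool.false_eq_true, if_false]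
      exact List.filter_congr hloc
    · rw [if_neg hb]
      have hmem : (p + 1) ∉ (p :: b :: bs) := by
        intro hm
        rcases List.mem_cons.mp hm with he | hm
        · omega
        · rcases List.mem_cons.mp hm with he | hm
          · exact hb he.symm
          · have := hbx _ hm; omega
      have hcond : (!decide ((p + 1) ∈ (p :: b :: bs))) = true := by simp [hmem]
      rw [List.map_cons, ih b b h']
      conv_rhs => rw [List.filter_cons]
      rw [hcond]
      simp only [if_true]
      exact congrArg (p :: ·) (List.filter_congr hloc)

theorem pvRuns_fst (bs : List Nat) (s p : Nat) (h : (p :: bs).Pairwise (· < ·)) :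
    (pvRuns s p bs).map (·.1) = s :: bs.filter (fun c => !decide ((c - 1) ∈ (p :: bs))) := by
  induction bs generalizing s p with
  | nil => simp [pvRuns]
  | cons b bs ih =>
    have hpb : p < b := (List.pairwise_cons.mp h).1 b (List.mem_cons_self ..)
    have h' : (b :: bs).Pairwise (· < ·) := (List.pairwise_cons.mp h).2
    have hbx : ∀ x ∈ bs, b < x := (List.pairwise_cons.mp h').1
    have hloc : ∀ c ∈ bs,
        (!decide ((c - 1) ∈ (b :: bs))) = (!decide ((c - 1) ∈ (p :: b :: bs))) := by
      intro c hc
      have hcb : b < c := hbx _ hc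
      have hiff : ((c - 1) ∈ (b :: bs)) ↔ ((c - 1) ∈ (p :: b :: bs)) := by
        constructor
        · intro hm; exact List.mem_cons_of_mem _ hm
        · intro hm
          rcases List.mem_cons.mp hm with he | hm
          · omega
          · exact hm
      exact congrArg (fun b => !b) (decide_eq_decide.mpr hiff)
    simp only [pvRuns]
    by_cases hb : b = p + 1
    · rw [if_pos hb, ih s b h']
      have hin : (b - 1) ∈ (p :: b :: bs) := by
        have he : b - 1 = p := by omega
        rw [he]; exact List.mem_cons_self ..
      have hcond : (!decide ((b - 1) ∈ (p :: b :: bs))) = false := by simp [hin]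
      conv_rhs => rw [List.filter_cons]
      rw [hcond]
      simp only [Bool.false_eq_true, if_false]
      exact congrArg (s :: ·) (List.filter_congr hloc)
    · rw [if_neg hb]
      have hmem : (b - 1) ∉ (p :: b :: bs) := by
        intro hm
        rcases List.mem_cons.mp hm with he | hm
        · omega
        · rcases List.mem_cons.mp hm with he | hm
          · omega
          · have := hbx _ hm; omega
      have hcond : (!decide ((b - 1) ∈ (p :: b :: bs))) = true := by simp [hmem]
      rw [List.map_cons, ih b b h']
      conv_rhs => rw [List.filter_cons]
      rw [hcond]
      simp only [if_true]
      exact congrArg (s :: ·) (congrArg (b :: ·) (List.filter_congr hloc))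

theorem pvZip_fst_snd {α β : Type} (l : List (α × β)) :
    (l.map (·.1)).zip (l.map (·.2)) = l := by
  induction l with
  | nil => rfl
  | cons a t ih => simp [ih]

theorem pvMain (mask : Int) (h : 0 < mask) :
    (match pvBitsLoop mask 0 with
      | [] => ""
      | b0 :: rest =>
        let r := pvMergeLoop rest [] b0 b0
        PySem.Str.join "," (r.1 ++ [pvFmt r.2.1 r.2.2]))
    = (let m := mask.toNat
       let n := m.size
       let starts := (List.range n).filter fun c => m.testBit c && (c == 0 || !m.testBit (c - 1))
       let ends := (List.range n).filter fun c => m.testBit c && !m.testBit (c + 1)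
       PySem.Str.join "," ((starts.zip ends).map fun p => pvFmt p.1 p.2)) := by
  have hm0 : mask.toNat ≠ 0 := by omega
  have hbits : pvBitsLoop mask 0
      = (List.range (mask.toNat).size).filter (mask.toNat).testBit := by
    rw [pvBitsLoop_eq, pvNatBits_eq_filter]
    simp
  have hne : (List.range (mask.toNat).size).filter (mask.toNat).testBit ≠ [] := by
    rw [← pvNatBits_eq_filter]
    exact pvNatBits_ne_nil hm0
  rcases hL : (List.range (mask.toNat).size).filter (mask.toNat).testBit with _ | ⟨b0, bs⟩
  · exact absurd hL hne
  · have hsort : (b0 :: bs).Pairwise (· < ·) := by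
      rw [← hL]
      exact List.Pairwise.filter _ List.pairwise_lt_range
    have hb0x : ∀ x ∈ bs, b0 < x := (List.pairwise_cons.mp hsort).1
    have hmem : ∀ c, (c ∈ (b0 :: bs)) ↔ (mask.toNat).testBit c = true := by
      intro c
      rw [← hL]
      simp only [List.mem_filter, List.mem_range]
      constructor
      · exact fun hx => hx.2
      · intro htb
        exact ⟨Nat.lt_size.mpr (Nat.ge_two_pow_of_testBit htb), htb⟩
    have hdec : ∀ c : Nat, decide (c ∈ (b0 :: bs)) = (mask.toNat).testBit c := by
      intro c
      by_cases htb : (mask.toNat).testBit c = true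
      · simp [htb, (hmem c).mpr htb]
      · have : c ∉ (b0 :: bs) := fun hx => htb ((hmem c).mp hx)
        simp [this, Bool.eq_false_iff.mpr htb]
    -- the B-side filters are the run starts and ends
    have hstarts : (List.range (mask.toNat).size).filter
          (fun c => (mask.toNat).testBit c && (c == 0 || !(mask.toNat).testBit (c - 1)))
        = (pvRuns b0 b0 bs).map (·.1) := by
      rw [pvRuns_fst bs b0 b0 hsort]
      have h1 : (List.range (mask.toNat).size).filter
            (fun c => (mask.toNat).testBit c && (c == 0 || !(mask.toNat).testBit (c - 1)))
          = ((List.range (mask.toNat).size).filter (mask.toNat).testBit).filter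
              (fun c => c == 0 || !(mask.toNat).testBit (c - 1)) := by
        rw [List.filter_filter]
        apply List.filter_congr
        intro c _
        rw [Bool.and_comm]
      rw [h1, hL, List.filter_cons]
      have hhead : (b0 == 0 || !(mask.toNat).testBit (b0 - 1)) = true := by
        by_cases hz : b0 = 0
        · simp [hz]
        · have hnm : (b0 - 1) ∉ (b0 :: bs) := by
            intro hx
            rcases List.mem_cons.mp hx with he | hx
            · omega
            · have := hb0x _ hx; omega
          have : (mask.toNat).testBit (b0 - 1) = false := by
            rw [← hdec]; simp [hnm]
          simp [this]
      rw [hhead]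
      simp only [if_true]
      congr 1
      apply List.filter_congr
      intro c hc
      have hcb : b0 < c := hb0x _ hc
      have hz : (c == 0) = false := by simp; omega
      rw [hz, hdec (c - 1)]
      simp
    have hends : (List.range (mask.toNat).size).filter
          (fun c => (mask.toNat).testBit c && !(mask.toNat).testBit (c + 1))
        = (pvRuns b0 b0 bs).map (·.2) := by
      rw [pvRuns_snd bs b0 b0 hsort]
      have h1 : (List.range (mask.toNat).size).filter
            (fun c => (mask.toNat).testBit c && !(mask.toNat).testBit (c + 1))
          = ((List.range (mask.toNat).size).filter (mask.toNat).testBit).filter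
              (fun c => !(mask.toNat).testBit (c + 1)) := by
        rw [List.filter_filter]
        apply List.filter_congr
        intro c _
        rw [Bool.and_comm]
      rw [h1, hL]
      apply List.filter_congr
      intro c _
      rw [hdec (c + 1)]
    rw [hbits, hL]
    dsimp only
    rw [hstarts, hends, pvZip_fst_snd, pvMergeLoop_flat]
    simp

-- ===== VERDICT (by name: the statement is the Claim_ definition above) =====
theorem hex_mask_to_cpu_list_spec : Claim_equal_hex_mask_to_cpu_list := by
  intro s hdom hpre
  unfold Spec_hex_mask_to_cpu_list hex_mask_to_cpu_list hex_mask_to_cpu_list_alt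
  by_cases hstrip : PySem.Str.strip s = ""
  · simp [hstrip]
  · simp only [hstrip, if_false]
    rcases hpre with hpre | hpre
    · exact absurd hpre hstrip
    · have hsome : (pvMaskOfEnum? ((PySem.Chars.splitOn s.toList [',']).map String.ofList)).isSome = true :=
        pvMaskOfEnum?_isSome _ hpre
      obtain ⟨mask, hmask⟩ := Option.isSome_iff_exists.mp hsome
      rw [pvMaskShift?_eq, hmask]
      by_cases hpos : 0 < mask
      · simp only [Option.map_some, not_le.mpr hpos, if_false]
        exact (pvMain mask hpos).trans (pvAltBits mask.toNat).symm
      · have hle : mask ≤ 0 := not_lt.mp hpos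
        have hb : pvBitsLoop mask 0 = [] := by
          unfold pvBitsLoop; simp [hpos]
        simp [hb, hle]
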